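-- pv_equiv track=rewrite | github.com/frankbozar/Competitive-Programming | Solo Practice/Jisuanke/2/B-D.py | __f
-- ===== SOURCE A (Python) =====
-- def __f(r):
-- 	r=r.replace('float', 'Decimal')
-- 	c, s='1234567890.', ''
-- 	i=0
-- 	while i<len(r):
-- 		if r[i] not in c:
-- 			s+=r[i]
-- 			i+=1
-- 		else:
-- 			j=i
-- 			while j<len(r) and r[j] in c:
-- 				j+=1
-- 			t=r[i:j]
-- 			if '.' in t:
-- 				t='Decimal(\''+t+'\')'
-- 			s+=t
-- 			i=j
-- 	return s
-- ===== SOURCE B (Python) =====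
-- import re
--
-- def __f(r):
--     r = r.replace('float', 'Decimal')
--     def repl(m):
--         t = m.group()
--         return "Decimal('" + t + "')" if '.' in t else t
--     return re.sub(r'[0-9.]+', repl, r)
-- ===== Notes on version B (the rewrite author's own statement) =====
-- stated objective: idiomatic
-- what changed: A's hand-written index scan (outer while with manual i/j bookkeeping, an inner while advancing over each digit/dot run, and incremental string concatenation) is replaced by one re.sub over the digit-or-dot token pattern whose callback wraps dotted matches in a Decimal constructor; the regex engine does the maximal-run tokenization.
import Mathlib
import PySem

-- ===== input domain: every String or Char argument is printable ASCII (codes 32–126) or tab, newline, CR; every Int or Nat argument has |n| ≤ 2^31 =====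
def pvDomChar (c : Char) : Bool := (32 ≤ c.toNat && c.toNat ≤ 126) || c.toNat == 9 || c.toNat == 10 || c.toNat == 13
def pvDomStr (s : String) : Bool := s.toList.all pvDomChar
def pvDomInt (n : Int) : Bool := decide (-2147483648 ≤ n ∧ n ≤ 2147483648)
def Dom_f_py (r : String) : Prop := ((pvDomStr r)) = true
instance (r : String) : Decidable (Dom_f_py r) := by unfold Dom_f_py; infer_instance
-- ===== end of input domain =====

-- B replaces A's hand-written index scan (outer while + run-advancing inner while + string
-- accumulator) with a single re.sub over the pattern [0-9.]+ and a wrapping callback; objective: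
-- idiomatic. Return values are proved equal on all inputs.

-- ===== PORT A =====
-- strings are handled as char lists; the final result is packed back into a String
-- inner while loop: j advances while r[j] is in the class c; returns (r[i:j], r[j:])
def pvTokA : List Char → List Char × List Char
  | [] => ([], [])
  | a :: as =>
      if ("1234567890.".toList.contains a) then
        let p := pvTokA as
        (a :: p.1, p.2)
      else ([], a :: as)

-- needed by pvLoopA's termination proof
theorem pvTokA_snd_le (l : List Char) : (pvTokA l).2.length ≤ l.length := by
  induction l with
  | nil => simp [pvTokA]
  | cons a as ih =>
      rw [pvTokA]
      split
      · simpa using ih.trans (Nat.le_succ _)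
      · simp

-- outer while loop with the accumulator s
def pvLoopA (s : List Char) : List Char → List Char
  | [] => s
  | a :: as =>
      if h : ("1234567890.".toList.contains a) = false then
        pvLoopA (s ++ [a]) as
      else
        let p := pvTokA (a :: as)
        let t := p.1
        let t := if t.contains '.' then "Decimal('".toList ++ t ++ "')".toList else t
        pvLoopA (s ++ t) p.2
  termination_by l => l.length
  decreasing_by
    · simp
    · have h' : ("1234567890.".toList.contains a) = true := by
        cases hb : ("1234567890.".toList.contains a) with
        | false => exact absurd hb h
        | true => rfl
      rw [pvTokA, if_pos h']
      have := pvTokA_snd_le as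
      simp only [List.length_cons]
      omega

def f_py (r : String) : String :=
  String.ofList (pvLoopA [] (PySem.Str.replace r "float" "Decimal").toList)

-- ===== PORT B =====
-- the regex character class [0-9.]
def pvTokClass (c : Char) : Bool := ('0' ≤ c && c ≤ '9') || c == '.'

-- the callback repl, applied to a matched run
def pvRepl (t : List Char) : List Char :=
  if t.contains '.' then "Decimal('".toList ++ t ++ "')".toList else t

-- re.sub r'[0-9.]+' repl: rewrite each maximal run of the class via repl, copy everything else
def pvSub : List Char → List Char
  | [] => []
  | a :: as =>
      if h : pvTokClass a then
        pvRepl ((a :: as).takeWhile pvTokClass) ++ pvSub ((a :: as).dropWhile pvTokClass)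
      else a :: pvSub as
  termination_by l => l.length
  decreasing_by
    · have := List.length_dropWhile_le (p := pvTokClass) (l := as)
      simp [h]
      omega
    · simp

def f_py_alt (r : String) : String :=
  String.ofList (pvSub (PySem.Str.replace r "float" "Decimal").toList)

-- ===== PRECONDITION & SPEC =====
def Spec_f_py (r : String) (out : String) : Prop := out = f_py_alt r
instance (r : String) (out : String) : Decidable (Spec_f_py r out) := by unfold Spec_f_py; infer_instance

-- ===== CLAIM (what is proved, stated in full; the proofs are below) =====
def Claim_equal_f_py : Prop := ∀ (r : String), Dom_f_py r → Spec_f_py r (f_py r)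

-- ===== LEMMAS AND PROOFS =====

-- A's membership test in the class string agrees with B's regex character class
theorem tok_eq (c : Char) : ("1234567890.".toList.contains c) = pvTokClass c := by
  have hl : "1234567890.".toList = ['1','2','3','4','5','6','7','8','9','0','.'] := by decide
  rw [hl, Bool.eq_iff_iff]
  simp only [List.contains_cons, List.contains_nil, Bool.or_eq_true, beq_iff_eq,
    pvTokClass, Bool.and_eq_true, decide_eq_true_eq, Char.ext_iff, Char.le_def,
    UInt32.le_iff_toNat_le, ← UInt32.toNat_inj,
    show '0'.val.toNat = 48 from rfl, show '1'.val.toNat = 49 from rfl, show '2'.val.toNat = 50 from rfl,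
    show '3'.val.toNat = 51 from rfl, show '4'.val.toNat = 52 from rfl, show '5'.val.toNat = 53 from rfl,
    show '6'.val.toNat = 54 from rfl, show '7'.val.toNat = 55 from rfl, show '8'.val.toNat = 56 from rfl,
    show '9'.val.toNat = 57 from rfl, show '.'.val.toNat = 46 from rfl]
  simp only [Bool.false_eq_true, or_false]
  omega

-- A's inner while loop is the (takeWhile, dropWhile) split at B's character class
theorem pvTokA_eq (l : List Char) :
    pvTokA l = (l.takeWhile pvTokClass, l.dropWhile pvTokClass) := by
  induction l with
  | nil => simp [pvTokA]
  | cons a as ih =>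
      rw [pvTokA, tok_eq]
      by_cases h : pvTokClass a
      · simp [h, ih]
      · simp [h]

-- A's accumulator loop produces the accumulator followed by B's rewriting
theorem pvLoopA_eq (l s : List Char) : pvLoopA s l = s ++ pvSub l := by
  induction l using pvSub.induct generalizing s with
  | case1 => simp [pvLoopA, pvSub]
  | case2 a as h ih =>
      rw [pvLoopA]
      have ht := tok_eq a
      rw [dif_neg (by rw [ht, h]; simp)]
      simp only [pvTokA_eq]
      rw [ih, pvSub, dif_pos h, pvRepl]
      split <;> simp
  | case3 a as h ih =>
      rw [pvLoopA]
      have ht := tok_eq a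
      rw [dif_pos (by rw [ht]; simpa using h)]
      rw [ih, pvSub, dif_neg h]
      simp

-- ===== VERDICT (by name: the statement is the Claim_ definition above) =====
theorem f_py_spec : Claim_equal_f_py := by
  intro r _
  unfold Spec_f_py f_py f_py_alt
  rw [pvLoopA_eq]
  rfl
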